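-- pv_equiv track=rewrite | github.com/KMDMNAK/psWord | psWord/parse/owakati.py | searchDocuments
-- ===== SOURCE A (Python) =====
-- def searchDocuments(nonstop_words_documents,searching_words):
--     document_index=0
--     document_index_lists=[[] for w in range(len(searching_words))]
--     for document in nonstop_words_documents:
--         for index in range(len(searching_words)):
--             if(searching_words[index] in document):
--                 document_index_lists[index].append(document_index)
--         document_index+=1
--     return document_index_lists
-- ===== SOURCE B (Python) =====
-- def searchDocuments(nonstop_words_documents, searching_words):
--     index = {}
--     for i, document in enumerate(nonstop_words_documents):
--         for w in set(document):
--             index.setdefault(w, []).append(i)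
--     return [list(index.get(w, [])) for w in searching_words]
-- ===== Notes on version B (the rewrite author's own statement) =====
-- stated objective: faster
-- what changed: Builds an inverted index (word -> list of document indices) in one pass over the documents, then answers each search word by a dict lookup, instead of scanning every search word against every document.
import Mathlib
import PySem

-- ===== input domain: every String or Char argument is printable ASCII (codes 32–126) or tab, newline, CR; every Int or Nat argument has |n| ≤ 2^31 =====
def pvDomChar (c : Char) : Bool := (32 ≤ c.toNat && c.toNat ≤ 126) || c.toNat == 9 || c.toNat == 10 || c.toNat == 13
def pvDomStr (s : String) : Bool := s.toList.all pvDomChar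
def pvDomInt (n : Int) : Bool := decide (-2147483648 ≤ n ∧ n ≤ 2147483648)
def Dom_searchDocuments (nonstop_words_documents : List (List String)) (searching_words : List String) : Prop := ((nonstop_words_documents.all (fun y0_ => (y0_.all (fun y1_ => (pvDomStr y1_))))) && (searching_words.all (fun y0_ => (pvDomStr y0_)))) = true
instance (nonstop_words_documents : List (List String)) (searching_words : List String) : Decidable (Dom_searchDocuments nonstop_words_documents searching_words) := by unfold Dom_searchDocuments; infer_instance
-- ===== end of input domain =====

-- B replaces A's per-document scan over all search words by an inverted index built
-- in one pass over the documents, answered by dictionary lookups (objective: faster).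


-- ===== PORT A =====
-- inner loop: 'for index in range(len(searching_words)): if searching_words[index] in document: document_index_lists[index].append(document_index)'
-- range(len(ws)) is exactly List.range ws.length (from 0, step 1); searching_words[index] with
-- index always in range is ws.getD index "" (exact here); lists[index].append(v) is set index (old ++ [v]).
def searchDocumentsInner (searching_words : List String) (document : List String) (document_index : Int)
    (lists : List (List Int)) : List (List Int) :=
  (List.range searching_words.length).foldl (fun ls index =>
    if document.contains (searching_words.getD index "") then
      ls.set index (ls.getD index [] ++ [document_index])
    else ls) lists

def searchDocuments (nonstop_words_documents : List (List String)) (searching_words : List String) : List (List Int) :=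
  (nonstop_words_documents.foldl (fun (st : List (List Int) × Int) document =>
      (searchDocumentsInner searching_words document st.2 st.1, st.2 + 1))
    (searching_words.map (fun _ => ([] : List Int)), 0)).1

-- ===== PORT B =====
-- 'for i, document in enumerate(docs): for w in set(document): index.setdefault(w, []).append(i)'
def invertedIndex (nonstop_words_documents : List (List String)) : PySem.Dict String (List Int) :=
  (PySem.List.enumerate nonstop_words_documents 0).foldl (fun d p =>
    (PySem.Set.ofList p.2).foldl (fun d w => d.modify w [] (· ++ [p.1])) d) PySem.Dict.empty

-- 'return [list(index.get(w, [])) for w in searching_words]' (list(...) copies; identity here)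
def searchDocuments_alt (nonstop_words_documents : List (List String)) (searching_words : List String) : List (List Int) :=
  searching_words.map (fun w => (invertedIndex nonstop_words_documents).getD w [])

-- ===== PRECONDITION & SPEC =====
def Spec_searchDocuments (nonstop_words_documents : List (List String)) (searching_words : List String) (out : List (List Int)) : Prop := out = searchDocuments_alt nonstop_words_documents searching_words
instance (nonstop_words_documents : List (List String)) (searching_words : List String) (out : List (List Int)) : Decidable (Spec_searchDocuments nonstop_words_documents searching_words out) := by unfold Spec_searchDocuments; infer_instance

-- ===== CLAIM (what is proved, stated in full; the proofs are below) =====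
def Claim_equal_searchDocuments : Prop := ∀ (nonstop_words_documents : List (List String)) (searching_words : List String), Dom_searchDocuments nonstop_words_documents searching_words → Spec_searchDocuments nonstop_words_documents searching_words (searchDocuments nonstop_words_documents searching_words)

-- ===== LEMMAS AND PROOFS =====

-- Common characterisation both ports are reduced to: the indices (counting from i)
-- of the documents that contain w.
def colOf (w : String) (docs : List (List String)) (i : Int) : List Int :=
  match docs with
  | [] => []
  | d :: rest => (if w ∈ d then [i] else []) ++ colOf w rest (i + 1)

-- A's inner fold, pointwise: position j is updated exactly when j < n.
theorem innerA_getElem? (ws document : List String) (di : Int) (n : Nat) (ls : List (List Int)) (j : Nat) :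
    (((List.range n).foldl (fun ls index =>
      if document.contains (ws.getD index "") then ls.set index (ls.getD index [] ++ [di]) else ls) ls))[j]?
      = if j < n then (ls[j]?).map (fun l => if document.contains (ws.getD j "") then l ++ [di] else l)
        else ls[j]? := by
  induction n generalizing ls with
  | zero => simp
  | succ n ih =>
      rw [List.range_succ, List.foldl_append]
      simp only [List.foldl_cons, List.foldl_nil]
      by_cases hc : document.contains (ws.getD n "") = true
      · rw [if_pos hc]
        by_cases hj : j = n
        · subst hj
          rw [List.getElem?_set_self', List.getD_eq_getElem?_getD, ih]
          simp only [lt_irrefl, if_false]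
          rw [if_pos (Nat.lt_succ_self j)]
          cases h : ls[j]? with
          | none => rfl
          | some l =>
              simp only [Option.map_eq_map, Option.map_some, Option.getD_some, Function.const_apply]
              rw [if_pos hc]
        · rw [List.getElem?_set_ne (by omega), ih]
          by_cases hjn : j < n
          · rw [if_pos hjn, if_pos (by omega)]
          · rw [if_neg hjn, if_neg (by omega)]
      · rw [if_neg hc, ih]
        by_cases hj : j = n
        · subst hj
          rw [if_neg (lt_irrefl j), if_pos (Nat.lt_succ_self j)]
          cases h : ls[j]? with
          | none => rfl
          | some l => simp only [Option.map_some]; rw [if_neg hc]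
        · by_cases hjn : j < n
          · rw [if_pos hjn, if_pos (by omega)]
          · rw [if_neg hjn, if_neg (by omega)]

-- A's inner fold on a map-shaped list keeps the map shape.
theorem innerA_map (ws document : List String) (di : Int) (f : String → List Int) :
    searchDocumentsInner ws document di (ws.map f)
      = ws.map (fun w => f w ++ (if document.contains w then [di] else [])) := by
  apply List.ext_getElem?
  intro j
  unfold searchDocumentsInner
  rw [innerA_getElem?]
  by_cases hj : j < ws.length
  · rw [if_pos hj]
    have hws : ws.getD j "" = ws[j] := by
      rw [List.getD_eq_getElem?_getD, List.getElem?_eq_getElem hj]; rfl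
    rw [hws, List.getElem?_map, List.getElem?_map, List.getElem?_eq_getElem hj]
    simp only [Option.map_some]
    split <;> simp
  · rw [if_neg hj]
    have h1 : ws[j]? = none := by rw [List.getElem?_eq_none_iff]; omega
    rw [List.getElem?_map, List.getElem?_map, h1]
    rfl

-- A's outer fold, starting from any map-shaped state and any counter.
theorem outerA (ws : List String) (docs : List (List String)) (f : String → List Int) (c : Int) :
    (docs.foldl (fun (st : List (List Int) × Int) document =>
        (searchDocumentsInner ws document st.2 st.1, st.2 + 1)) (ws.map f, c)).1
      = ws.map (fun w => f w ++ colOf w docs c) := by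
  induction docs generalizing f c with
  | nil => simp [colOf]
  | cons doc rest ih =>
      simp only [List.foldl_cons]
      rw [innerA_map, ih]
      apply List.map_congr_left
      intro w _
      rw [colOf]
      by_cases h : w ∈ doc
      · simp [h, List.append_assoc]
      · simp [h]

theorem searchDocuments_eq_col (docs : List (List String)) (ws : List String) :
    searchDocuments docs ws = ws.map (fun w => colOf w docs 0) := by
  unfold searchDocuments
  rw [outerA]
  simp

-- B's per-document set fold appends the index once iff the document's set contains w.
theorem innerB (L : List String) (hnd : L.Nodup) (d : PySem.Dict String (List Int)) (i : Int) (w : String) :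
    (L.foldl (fun d w' => d.modify w' [] (· ++ [i])) d).getD w []
      = d.getD w [] ++ (if w ∈ L then [i] else []) := by
  induction L generalizing d with
  | nil => simp
  | cons x L ih =>
      rcases List.nodup_cons.mp hnd with ⟨hx, hnd'⟩
      simp only [List.foldl_cons]
      rw [ih hnd']
      by_cases hw : w = x
      · subst hw
        rw [PySem.Dict.getD_modify_self, if_neg hx, if_pos (List.mem_cons_self ..)]
        simp
      · rw [PySem.Dict.getD_modify, if_neg hw]
        simp [List.mem_cons, hw]

-- B's outer fold over the enumerated documents accumulates exactly colOf.
theorem outerB (docs : List (List String)) (d : PySem.Dict String (List Int)) (c : Int) (w : String) :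
    ((PySem.List.enumerate docs c).foldl (fun d p =>
        (PySem.Set.ofList p.2).foldl (fun d w => d.modify w [] (· ++ [p.1])) d) d).getD w []
      = d.getD w [] ++ colOf w docs c := by
  induction docs generalizing d c with
  | nil => simp [PySem.List.enumerate_nil, colOf]
  | cons doc rest ih =>
      rw [PySem.List.enumerate_cons]
      simp only [List.foldl_cons]
      rw [ih, innerB _ (PySem.Set.nodup_ofList doc) d c w, colOf]
      by_cases h : w ∈ doc
      · have hm : w ∈ PySem.Set.ofList doc := (PySem.Set.mem_ofList doc w).mpr h
        simp [hm, h, List.append_assoc]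
      · have hm : w ∉ PySem.Set.ofList doc := fun hh => h ((PySem.Set.mem_ofList doc w).mp hh)
        simp [hm, h]

theorem searchDocuments_alt_eq_col (docs : List (List String)) (ws : List String) :
    searchDocuments_alt docs ws = ws.map (fun w => colOf w docs 0) := by
  unfold searchDocuments_alt invertedIndex
  apply List.map_congr_left
  intro w _
  rw [outerB]
  simp

-- ===== VERDICT (by name: the statement is the Claim_ definition above) =====
theorem searchDocuments_spec : Claim_equal_searchDocuments := by
  intro docs ws _
  unfold Spec_searchDocuments
  rw [searchDocuments_eq_col, searchDocuments_alt_eq_col]
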